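-- pv_equiv track=rewrite | github.com/dinesh-k-natarajan/advent-of-code | 2020/06/6.py | count_yes
-- ===== SOURCE A (Python) =====
-- def count_yes( answers, part2=False ):
--     """
--     For Part 1:
--     -----------
--     This function returns the count of questions to which atleast one
--     person in the group answered yes.
--
--     For Part 2:
--     -----------
--     This function returns the count of questions to which every
--     person in the group answered yes.
--     """
--     count_any = 0
--     count_all = 0
--     for group in answers:
--         yes_any    = set( [result for item in group for result in item] )
--         count_any += len(yes_any)
--         yes_all    = set(group[0]).intersection( *group[1:] )
--         count_all += len(yes_all)
--     if not part2:
--         return count_any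
--     else:
--         return count_all
-- ===== SOURCE B (Python) =====
-- def count_yes(answers, part2=False):
--     # One frequency table per group: a question's key count equals the number of
--     # people who answered yes to it; distinct keys give the "any" count and keys
--     # hit by every person give the "all" count.
--     count_any = 0
--     count_all = 0
--     for group in answers:
--         freq = {}
--         for person in group:
--             for q in set(person):
--                 freq[q] = freq.get(q, 0) + 1
--         count_any += len(freq)
--         count_all += sum(1 for q in freq if freq[q] == len(group))
--     return count_all if part2 else count_any
-- ===== Notes on version B (the rewrite author's own statement) =====
-- stated objective: alternative
-- what changed: Replaces A's per-group union set plus set.intersection chain with a single character-frequency dict per group: distinct keys give the any-count and keys whose count equals the group size give the all-count.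
-- outside the precondition, e.g. on count_yes([[]], False): A raises IndexError, B returns 0
-- crash fix: On inputs containing an empty group A raises IndexError at group[0]; B returns the counts with that group contributing 0 to both totals. — e.g. on count_yes([[]], false): A raises IndexError, B returns 0
import Mathlib
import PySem

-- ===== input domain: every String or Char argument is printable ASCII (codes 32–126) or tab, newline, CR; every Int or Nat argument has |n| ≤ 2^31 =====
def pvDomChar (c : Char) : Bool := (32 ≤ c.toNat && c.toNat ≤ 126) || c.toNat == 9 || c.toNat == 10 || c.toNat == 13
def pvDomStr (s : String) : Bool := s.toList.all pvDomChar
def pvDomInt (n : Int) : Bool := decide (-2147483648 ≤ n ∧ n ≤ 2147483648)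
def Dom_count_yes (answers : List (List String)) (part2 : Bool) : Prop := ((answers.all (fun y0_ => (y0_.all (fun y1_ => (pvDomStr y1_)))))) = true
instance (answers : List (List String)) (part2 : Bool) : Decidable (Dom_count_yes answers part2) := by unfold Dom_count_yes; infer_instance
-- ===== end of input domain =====

-- B replaces A's union set + set.intersection chain with one character-frequency dict per group
-- (distinct keys = "any" count, keys counted by every person = "all" count): an alternative of the same cost.

-- ===== PORT A =====
-- literal port of A; group[0] is PySem.List.pyGet? group 0 (IndexError on an empty group is
-- excluded by Pre_count_yes, so the .getD "" default is never taken on admitted inputs)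
def count_yes (answers : List (List String)) (part2 : Bool) : Int :=
  let st := answers.foldl (fun (acc : Int × Int) group =>
    let yes_any := PySem.Set.ofList (group.flatMap (fun item => item.toList))
    let count_any := acc.1 + PySem.Set.len yes_any
    let yes_all := (PySem.List.slice group (some 1) none).foldl
        (fun s item => PySem.Set.inter s item.toList)
        (PySem.Set.ofList (((PySem.List.pyGet? group 0).getD "").toList))
    (count_any, acc.2 + PySem.Set.len yes_all)) ((0 : Int), (0 : Int))
  if !part2 then st.1 else st.2

-- ===== PORT B =====
def count_yes_alt (answers : List (List String)) (part2 : Bool) : Int :=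
  let st := answers.foldl (fun (acc : Int × Int) group =>
    let freq := group.foldl (fun d person =>
        (PySem.Set.ofList person.toList).foldl
          (fun d q => d.insert q (d.getD q 0 + 1)) d)
      PySem.Dict.empty
    (acc.1 + (PySem.Dict.size freq : Int),
     acc.2 + ((freq.keys.filter
        (fun q => freq.getD q 0 == (group.length : Int))).length : Int)))
    ((0 : Int), (0 : Int))
  if part2 then st.2 else st.1

-- ===== PRECONDITION & SPEC =====
-- Pre_ excludes inputs containing an empty group, on which A raises IndexError at group[0].
def Pre_count_yes (answers : List (List String)) (part2 : Bool) : Prop :=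
  ∀ g ∈ answers, g ≠ []
instance (answers : List (List String)) (part2 : Bool) : Decidable (Pre_count_yes answers part2) := by unfold Pre_count_yes; infer_instance

def pvWitness_count_yes : List (List String) × Bool := ([["ab", "b"], ["c"]], true)

-- On inputs containing an empty group A raises IndexError at group[0]; B returns the counts with
-- that group contributing 0 to both totals.
def Raises_count_yes (answers : List (List String)) (part2 : Bool) : Prop :=
  ∃ g ∈ answers, g = []
instance (answers : List (List String)) (part2 : Bool) : Decidable (Raises_count_yes answers part2) := by unfold Raises_count_yes; infer_instance

def pvRaiseWitness_count_yes : List (List String) × Bool := ([[]], false)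
def pvRaiseWitnessOut_count_yes : Int := 0

def Spec_count_yes (answers : List (List String)) (part2 : Bool) (out : Int) : Prop := out = count_yes_alt answers part2
instance (answers : List (List String)) (part2 : Bool) (out : Int) : Decidable (Spec_count_yes answers part2 out) := by unfold Spec_count_yes; infer_instance

-- ===== CLAIM (what is proved, stated in full; the proofs are below) =====
def Claim_equal_count_yes : Prop := ∀ (answers : List (List String)) (part2 : Bool), Dom_count_yes answers part2 → Pre_count_yes answers part2 → Spec_count_yes answers part2 (count_yes answers part2)

def Claim_raises_count_yes : Prop := (∀ (answers : List (List String)) (part2 : Bool), Dom_count_yes answers part2 → Raises_count_yes answers part2 → ¬ Pre_count_yes answers part2) ∧ (Dom_count_yes (pvRaiseWitness_count_yes.1) (pvRaiseWitness_count_yes.2) ∧ Raises_count_yes (pvRaiseWitness_count_yes.1) (pvRaiseWitness_count_yes.2) ∧ count_yes_alt (pvRaiseWitness_count_yes.1) (pvRaiseWitness_count_yes.2) = pvRaiseWitnessOut_count_yes)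

-- ===== LEMMAS AND PROOFS =====

-- update by the deduplicated list is update by the list
theorem pv_update_ofList {s : PySem.Set Char} (xs : List Char) :
    PySem.Set.update s (PySem.Set.ofList xs) = PySem.Set.update s xs := by
  rw [PySem.Set.update_eq_append_filter, PySem.Set.update_eq_append_filter,
    PySem.Set.ofList_ofList]

-- per-person dedup does not change the set of all characters of a group
theorem pv_update_flatMap (g : List String) (s : PySem.Set Char) :
    PySem.Set.update s (g.flatMap (fun p => PySem.Set.ofList p.toList)) =
    PySem.Set.update s (g.flatMap (fun p => p.toList)) := by
  induction g generalizing s with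
  | nil => rfl
  | cons p r ih =>
      simp only [List.flatMap_cons, PySem.Set.update_append, pv_update_ofList]
      exact ih _

theorem pv_ofList_flatMap (g : List String) :
    PySem.Set.ofList (g.flatMap (fun p => PySem.Set.ofList p.toList)) =
    PySem.Set.ofList (g.flatMap (fun p => p.toList)) := by
  rw [← PySem.Set.update_nil_left, ← PySem.Set.update_nil_left, pv_update_flatMap]

-- the per-group frequency dict is the counter of the per-person-deduped characters
theorem pv_freq_eq_counter (g : List String) :
    g.foldl (fun d person =>
        (PySem.Set.ofList person.toList).foldl
          (fun d q => d.insert q (d.getD q 0 + 1)) d) PySem.Dict.empty =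
    PySem.Dict.counter (g.flatMap (fun p => PySem.Set.ofList p.toList)) := by
  rw [← PySem.Dict.foldl_insert_getD_add_one_eq_counter, List.foldl_flatMap]

-- a character's multiplicity in the deduped flatMap counts the people who have it
theorem pv_count_flatMap (g : List String) (q : Char) :
    (g.flatMap (fun p => PySem.Set.ofList p.toList)).count q =
    g.countP (fun p => p.toList.contains q) := by
  induction g with
  | nil => rfl
  | cons p r ih =>
      simp only [List.flatMap_cons, List.count_append, List.countP_cons, ih]
      by_cases h : q ∈ p.toList
      · rw [List.count_eq_one_of_mem (PySem.Set.nodup_ofList _) (by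
          simpa [PySem.Set.mem_ofList] using h)]
        simp [h]
        omega
      · rw [List.count_eq_zero_of_not_mem (by
          simpa [PySem.Set.mem_ofList] using h)]
        simp [h]

-- the intersection fold is a filter by "every remaining person contains q"
theorem pv_inter_fold (r : List String) (s0 : PySem.Set Char) :
    r.foldl (fun s item => PySem.Set.inter s item.toList) s0 =
    s0.filter (fun q => r.all (fun i => i.toList.contains q)) := by
  induction r generalizing s0 with
  | nil => simp
  | cons i r ih =>
      rw [List.foldl_cons, ih, PySem.Set.inter, List.filter_filter]
      refine List.filter_congr ?_
      intro x _
      simp [Bool.and_comm]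

-- two Nodup lists with the same members have the same length
theorem pv_length_eq_of_nodup {l₁ l₂ : List Char} (h₁ : l₁.Nodup) (h₂ : l₂.Nodup)
    (h : ∀ x, x ∈ l₁ ↔ x ∈ l₂) : l₁.length = l₂.length := by
  rw [← List.toFinset_card_of_nodup h₁, ← List.toFinset_card_of_nodup h₂]
  congr 1
  ext x
  simpa using h x

-- proof-only abbreviation for B's per-group frequency dict
def pvFreq (g : List String) : PySem.Dict Char Int :=
  g.foldl (fun d person =>
      (PySem.Set.ofList person.toList).foldl
        (fun d q => d.insert q (d.getD q 0 + 1)) d) PySem.Dict.empty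

theorem pv_freq_keys (g : List String) :
    (pvFreq g).keys = PySem.Set.ofList (g.flatMap (fun p => p.toList)) := by
  rw [pvFreq, pv_freq_eq_counter, PySem.Dict.keys_counter, pv_ofList_flatMap]

theorem pv_freq_getD (g : List String) (q : Char) :
    (pvFreq g).getD q 0 = (g.countP (fun p => p.toList.contains q) : Int) := by
  rw [pvFreq, pv_freq_eq_counter, PySem.Dict.getD_counter, pv_count_flatMap]

theorem pv_size_eq_keys_length {κ ν : Type} [BEq κ] (d : PySem.Dict κ ν) :
    PySem.Dict.size d = d.keys.length := by
  simp [PySem.Dict.size, PySem.Dict.keys]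

-- per-group "any" counts agree
theorem pv_group_any (g : List String) :
    PySem.Set.len (PySem.Set.ofList (g.flatMap (fun item => item.toList))) =
    (PySem.Dict.size (pvFreq g) : Int) := by
  rw [pv_size_eq_keys_length, pv_freq_keys, PySem.Set.len]

-- per-group "all" counts agree on a nonempty group
theorem pv_group_all (p : String) (r : List String) :
    PySem.Set.len ((PySem.List.slice (p :: r) (some 1) none).foldl
        (fun s item => PySem.Set.inter s item.toList)
        (PySem.Set.ofList (((PySem.List.pyGet? (p :: r) 0).getD "").toList))) =
    (((pvFreq (p :: r)).keys.filter
        (fun q => (pvFreq (p :: r)).getD q 0 == ((p :: r).length : Int))).length : Int) := by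
  have hget : (PySem.List.pyGet? (p :: r) 0).getD "" = p := by
    simp [PySem.List.pyGet?, PySem.List.pyIdx?]
  rw [PySem.List.slice_from_one, hget, List.tail_cons, pv_inter_fold, PySem.Set.len,
    pv_freq_keys]
  have hlen :
      ((PySem.Set.ofList p.toList).filter
          (fun q => r.all (fun i => i.toList.contains q))).length =
      ((PySem.Set.ofList ((p :: r).flatMap (fun g => g.toList))).filter
          (fun q => (pvFreq (p :: r)).getD q 0 == (((p :: r).length : Nat) : Int))).length := by
    apply pv_length_eq_of_nodup
    · exact (PySem.Set.nodup_ofList _).filter _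
    · exact (PySem.Set.nodup_ofList _).filter _
    · intro x
      simp only [List.mem_filter, PySem.Set.mem_ofList, pv_freq_getD, List.mem_flatMap,
        List.all_eq_true, List.contains_eq_mem, beq_iff_eq, Int.natCast_inj,
        List.countP_eq_length, decide_eq_true_eq]
      constructor
      · rintro ⟨hp, hall⟩
        refine ⟨⟨p, List.mem_cons_self, hp⟩, ?_⟩
        intro a ha
        rcases List.mem_cons.mp ha with rfl | ha
        · simpa using hp
        · simpa using hall a ha
      · rintro ⟨⟨w, hw, hx⟩, hall⟩
        refine ⟨by simpa using hall p List.mem_cons_self, ?_⟩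
        intro a ha
        simpa using hall a (List.mem_cons_of_mem _ ha)
  exact_mod_cast hlen

-- the two folds agree on a list of nonempty groups, for any accumulator
theorem pv_fold_eq (l : List (List String)) (h : ∀ g ∈ l, g ≠ []) (acc : Int × Int) :
    l.foldl (fun (acc : Int × Int) group =>
      (acc.1 + PySem.Set.len (PySem.Set.ofList (group.flatMap (fun item => item.toList))),
       acc.2 + PySem.Set.len ((PySem.List.slice group (some 1) none).foldl
          (fun s item => PySem.Set.inter s item.toList)
          (PySem.Set.ofList (((PySem.List.pyGet? group 0).getD "").toList))))) acc =
    l.foldl (fun (acc : Int × Int) group =>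
      (acc.1 + (PySem.Dict.size (pvFreq group) : Int),
       acc.2 + (((pvFreq group).keys.filter
          (fun q => (pvFreq group).getD q 0 == (group.length : Int))).length : Int))) acc := by
  induction l generalizing acc with
  | nil => rfl
  | cons g l ih =>
      obtain ⟨p, r, rfl⟩ : ∃ p r, g = p :: r := by
        cases g with
        | nil => exact absurd rfl (h _ List.mem_cons_self)
        | cons p r => exact ⟨p, r, rfl⟩
      simp only [List.foldl_cons]
      rw [pv_group_any, pv_group_all]
      exact ih (fun g hg => h g (List.mem_cons_of_mem _ hg)) _

-- ===== VERDICT (by name: the statement is the Claim_ definition above) =====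
theorem count_yes_spec : Claim_equal_count_yes := by
  intro answers part2 _ hpre
  unfold Spec_count_yes count_yes count_yes_alt
  rw [pv_fold_eq answers hpre]
  cases part2 <;> rfl

@[simp] theorem count_yes_raises : Claim_raises_count_yes := by
  unfold Claim_raises_count_yes
  exact ⟨fun answers part2 _ h hpre => by
    obtain ⟨g, hg, rfl⟩ := h; exact (hpre _ hg) rfl, by decide⟩
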